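-- pv_equiv track=rewrite | github.com/aniketgauba67/Project1_Group1-CS-401- | code_1.py | weighted_majority_graph
-- ===== SOURCE A (Python) =====
-- from collections import defaultdict
--
-- def pairwise(ballots, a, b):
--     # input:
--         # ballots
--         # a and b
--     # returns the count of a > b or b > a
--     a_greater_b, b_greater_a = 0,0
--     for v in ballots:
--         index_a = v.index(a)
--         index_b = v.index(b)
--         if index_a < index_b:
--             a_greater_b += 1
--         else:
--             b_greater_a += 1
--
--     return a_greater_b, b_greater_a
--
-- def weighted_majority_graph(ballots, candidates):
--     # input:
--         # ballots
--         # candidates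
--     # returns a dictionary of dictionaries that contains data for all pairwise operations
--     results = defaultdict(dict)
--     list_size = len(candidates)
--     curr_index = 0
--     for c in range(len(candidates) - 1):
--         for c1 in range(1, len(candidates)):
--             if c != c1:
--                 candidate_a = candidates[c]
--                 candidate_b = candidates[c1]
--                 a_wins, b_wins = pairwise(ballots, candidate_a, candidate_b)
--                 results[candidate_a][candidate_b] = (a_wins, b_wins)
--                 results[candidate_b][candidate_a] = (b_wins, a_wins)
--     #         if c + c1 < len(candidates):
--     #             results[candidates[c]][candidates[c + c1]] = pairwise(ballots, candidates[c], candidates[c + c1])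
--
--     return results
-- ===== SOURCE B (Python) =====
-- def weighted_majority_graph(ballots, candidates):
--     # One pass over the ballots: build a first-occurrence rank map per ballot and
--     # count, for every ordered index pair of candidates, the ballots ranking the
--     # first ahead; then emit the table in A's key order from those counts.
--     n = len(candidates)
--     total = len(ballots)
--     beats = {}
--     for v in ballots:
--         rank = {}
--         for pos, x in enumerate(v):
--             if x not in rank:
--                 rank[x] = pos
--         for c in range(n):
--             for c1 in range(n):
--                 if c != c1 and rank[candidates[c]] < rank[candidates[c1]]:
--                     beats[(c, c1)] = beats.get((c, c1), 0) + 1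
--     results = {}
--     for c in range(n - 1):
--         for c1 in range(1, n):
--             if c != c1:
--                 a, b = candidates[c], candidates[c1]
--                 w = beats.get((c, c1), 0)
--                 results.setdefault(a, {})[b] = (w, total - w)
--                 results.setdefault(b, {})[a] = (total - w, w)
--     return results
-- ===== Notes on version B (the rewrite author's own statement) =====
-- stated objective: alternative
-- what changed: A calls pairwise() which rescans every ballot with list.index for each of the O(n^2) candidate pairs; B makes a single pass over the ballots, building a first-occurrence rank dict per ballot and a counter keyed by ordered index pair, then emits the table in A's key order from counter lookups and the complement total-w.
import Mathlib
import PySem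

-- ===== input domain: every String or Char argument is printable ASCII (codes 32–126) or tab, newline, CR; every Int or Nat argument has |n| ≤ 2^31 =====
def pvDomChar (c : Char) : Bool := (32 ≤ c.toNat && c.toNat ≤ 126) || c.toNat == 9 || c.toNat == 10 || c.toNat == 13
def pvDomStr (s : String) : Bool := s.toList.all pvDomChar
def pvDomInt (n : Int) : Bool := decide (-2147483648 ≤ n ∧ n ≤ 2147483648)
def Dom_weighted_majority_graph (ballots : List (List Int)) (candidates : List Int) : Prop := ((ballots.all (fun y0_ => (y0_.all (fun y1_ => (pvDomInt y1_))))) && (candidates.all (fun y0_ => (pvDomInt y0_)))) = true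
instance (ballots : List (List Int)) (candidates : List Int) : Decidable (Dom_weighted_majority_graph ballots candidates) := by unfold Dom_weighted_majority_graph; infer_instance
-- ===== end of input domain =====

-- B replaces A's per-pair ballot rescans (pairwise with list.index) by a single pass
-- over the ballots that builds a first-occurrence rank dict per ballot and a counter
-- keyed by ordered index pair, then emits the table in A's key order (objective: alternative).

-- ===== PORT A =====
def pvPairwise (ballots : List (List Int)) (a b : Int) : Int × Int :=
  ballots.foldl
    (fun (acc : Int × Int) v =>
      let ia := (PySem.List.index? v a).getD 0   -- v.index(a); a missing candidate (ValueError) is excluded by Pre_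
      let ib := (PySem.List.index? v b).getD 0
      if ia < ib then (acc.1 + 1, acc.2) else (acc.1, acc.2 + 1))
    (0, 0)

def weighted_majority_graph (ballots : List (List Int)) (candidates : List Int) : List (Int × List (Int × Int × Int)) :=
  let n : Int := PySem.List.len candidates
  let results : PySem.Dict Int (PySem.Dict Int (Int × Int)) :=
    (PySem.List.pyRange 0 (n - 1) 1).foldl
      (fun r c =>
        (PySem.List.pyRange 1 n 1).foldl
          (fun r c1 =>
            if c ≠ c1 then
              let ca := PySem.List.pyGetD candidates c 0
              let cb := PySem.List.pyGetD candidates c1 0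
              let p := pvPairwise ballots ca cb
              let r := r.insert ca ((r.getD ca PySem.Dict.empty).insert cb p)
              r.insert cb ((r.getD cb PySem.Dict.empty).insert ca (p.2, p.1))
            else r)
          r)
      PySem.Dict.empty
  results.items.map (fun q => (q.1, q.2.items))

-- ===== PORT B =====
def pvRankDict (v : List Int) : PySem.Dict Int Int :=
  (PySem.List.enumerate v 0).foldl
    (fun r q => if r.contains q.2 then r else r.insert q.2 q.1)
    PySem.Dict.empty

def pvBeatsStep (candidates : List Int) (d : PySem.Dict (Int × Int) Int) (v : List Int) : PySem.Dict (Int × Int) Int :=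
  let n : Int := PySem.List.len candidates
  let rank := pvRankDict v
  (PySem.List.pyRange 0 n 1).foldl
    (fun d c =>
      (PySem.List.pyRange 0 n 1).foldl
        (fun d c1 =>
          if c ≠ c1 ∧ rank.getD (PySem.List.pyGetD candidates c 0) 0 < rank.getD (PySem.List.pyGetD candidates c1 0) 0 then
            -- rank[candidates[c]] (KeyError on a missing candidate) is excluded by Pre_
            let key := (c, c1)
            d.insert key (d.getD key 0 + 1)
          else d)
        d)
    d

def weighted_majority_graph_alt (ballots : List (List Int)) (candidates : List Int) : List (Int × List (Int × Int × Int)) :=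
  let n : Int := PySem.List.len candidates
  let total : Int := PySem.List.len ballots
  let beats : PySem.Dict (Int × Int) Int := ballots.foldl (pvBeatsStep candidates) PySem.Dict.empty
  let results : PySem.Dict Int (PySem.Dict Int (Int × Int)) :=
    (PySem.List.pyRange 0 (n - 1) 1).foldl
      (fun r c =>
        (PySem.List.pyRange 1 n 1).foldl
          (fun r c1 =>
            if c ≠ c1 then
              let a := PySem.List.pyGetD candidates c 0
              let b := PySem.List.pyGetD candidates c1 0
              let w := beats.getD (c, c1) 0
              let r := r.insert a ((r.getD a PySem.Dict.empty).insert b (w, total - w))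
              r.insert b ((r.getD b PySem.Dict.empty).insert a (total - w, w))
            else r)
          r)
      PySem.Dict.empty
  results.items.map (fun q => (q.1, q.2.items))

-- ===== PRECONDITION & SPEC =====
-- Pre_ excludes exactly the inputs with ≥ 2 candidates and a ballot missing some
-- candidate, on which A raises ValueError (list.index); A is total elsewhere.
def Pre_weighted_majority_graph (ballots : List (List Int)) (candidates : List Int) : Prop :=
  2 ≤ candidates.length → ∀ v ∈ ballots, ∀ c ∈ candidates, c ∈ v
instance (ballots : List (List Int)) (candidates : List Int) : Decidable (Pre_weighted_majority_graph ballots candidates) := by unfold Pre_weighted_majority_graph; infer_instance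

def pvWitness_weighted_majority_graph : List (List Int) × List Int := ([[1, 2, 3], [2, 3, 1], [3, 1, 2]], [1, 2, 3])

def Spec_weighted_majority_graph (ballots : List (List Int)) (candidates : List Int) (out : List (Int × List (Int × Int × Int))) : Prop := out = weighted_majority_graph_alt ballots candidates
instance (ballots : List (List Int)) (candidates : List Int) (out : List (Int × List (Int × Int × Int))) : Decidable (Spec_weighted_majority_graph ballots candidates out) := by unfold Spec_weighted_majority_graph; infer_instance

-- ===== CLAIM (what is proved, stated in full; the proofs are below) =====
def Claim_equal_weighted_majority_graph : Prop := ∀ (ballots : List (List Int)) (candidates : List Int), Dom_weighted_majority_graph ballots candidates → Pre_weighted_majority_graph ballots candidates → Spec_weighted_majority_graph ballots candidates (weighted_majority_graph ballots candidates)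

-- ===== LEMMAS AND PROOFS =====

-- getD through a fold of conditional counter increments keyed by K
lemma pv_getD_foldl_inc {α : Type} (l : List α) (K : α → Int × Int) (P : α → Prop)
    [DecidablePred P] (d : PySem.Dict (Int × Int) Int) (k : Int × Int) :
    (l.foldl (fun d x => if P x then d.insert (K x) (d.getD (K x) 0 + 1) else d) d).getD k 0
      = d.getD k 0 + (l.countP (fun x => decide (P x) && (K x == k)) : Int) := by
  induction l generalizing d with
  | nil => simp
  | cons x l ih =>
    simp only [List.foldl_cons, List.countP_cons, ih]
    by_cases hP : P x
    · simp only [hP, if_pos]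
      by_cases hK : K x = k
      · subst hK
        rw [PySem.Dict.getD_insert_self]
        simp
        ring
      · rw [PySem.Dict.getD_insert_of_ne _ _ _ (Ne.symm hK)]
        simp [hK]
    · simp [hP]

-- the same, through a nested double loop
lemma pv_getD_foldl_inc2 {α β : Type} (l1 : List α) (l2 : List β) (K : α → β → Int × Int)
    (P : α → β → Prop) [∀ a b, Decidable (P a b)] (d : PySem.Dict (Int × Int) Int) (k : Int × Int) :
    (l1.foldl (fun d c => l2.foldl (fun d c1 => if P c c1 then (d.insert (K c c1) (d.getD (K c c1) 0 + 1)) else d) d) d).getD k 0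
      = d.getD k 0 + ((l1.map (fun c => l2.countP (fun c1 => decide (P c c1) && (K c c1 == k)))).sum : Int) := by
  induction l1 generalizing d with
  | nil => simp
  | cons c l1 ih =>
    simp only [List.foldl_cons, List.map_cons, List.sum_cons, ih,
      pv_getD_foldl_inc l2 (K c) (P c) d k]
    push_cast
    ring

-- the first-occurrence loop building the rank dict, characterised by list.index
lemma pvRank_fold_get? (v : List Int) (x : Int) : ∀ (s : Int) (d : PySem.Dict Int Int),
    ((PySem.List.enumerate v s).foldl (fun r q => if r.contains q.2 then r else r.insert q.2 q.1) d).get? x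
      = if d.contains x then d.get? x
        else (PySem.List.index? v x).map (fun k => (s + (k : Int))) := by
  induction v with
  | nil =>
    intro s d
    rw [PySem.List.enumerate_nil]
    by_cases hx : d.contains x
    · simp [hx]
    · simp only [hx, Bool.false_eq_true, if_false, List.foldl_nil]
      simp [PySem.Dict.get?_eq_none_iff_contains, hx]
  | cons y v ih =>
    intro s d
    rw [PySem.List.enumerate_cons, List.foldl_cons, ih]
    by_cases hxy : x = y
    · subst hxy
      by_cases hx : d.contains x
      · simp [hx]
      · rw [PySem.List.index?_cons_self]
        simp [PySem.Dict.get?_insert_self, hx]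
    · rw [PySem.List.index?_cons_of_ne _ (Ne.symm hxy)]
      by_cases hy : d.contains y
      · simp only [hy, if_true]
        rcases h : PySem.List.index? v x with _ | k <;> simp <;> ring_nf
      · simp only [hy, Bool.false_eq_true, if_false, PySem.Dict.contains_insert, hxy,
          Bool.or_eq_true, beq_iff_eq, false_or]
        rw [PySem.Dict.get?_insert_of_ne _ _ hxy]
        rcases h : PySem.List.index? v x with _ | k <;> simp <;> ring_nf

lemma pvRankDict_getD (v : List Int) (x : Int) (hx : x ∈ v) :
    (pvRankDict v).getD x 0 = ((PySem.List.index? v x).getD 0 : Nat) := by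
  unfold pvRankDict
  rcases h : PySem.List.index? v x with _ | k
  · rw [PySem.List.index?_eq_none_iff] at h; exact absurd hx h
  · have hg := pvRank_fold_get? v x 0 PySem.Dict.empty
    rw [h] at hg
    simp at hg
    rw [PySem.Dict.getD_eq_get?_getD, hg]
    simp

-- pairwise is (count of index a < index b, count of the complement)
lemma pvPairwise_eq (ballots : List (List Int)) (a b : Int) :
    pvPairwise ballots a b =
      ((ballots.countP (fun v => decide ((PySem.List.index? v a).getD 0 < (PySem.List.index? v b).getD 0)) : Int),
       (ballots.countP (fun v => decide (¬ (PySem.List.index? v a).getD 0 < (PySem.List.index? v b).getD 0)) : Int)) := by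
  unfold pvPairwise
  have hstep : (fun (acc : Int × Int) (v : List Int) =>
      let ia := (PySem.List.index? v a).getD 0
      let ib := (PySem.List.index? v b).getD 0
      if ia < ib then (acc.1 + 1, acc.2) else (acc.1, acc.2 + 1))
    = (fun (acc : Int × Int) (v : List Int) =>
      ((fun (x : Int) (v : List Int) => if (PySem.List.index? v a).getD 0 < (PySem.List.index? v b).getD 0 then x + 1 else x) acc.1 v,
       (fun (y : Int) (v : List Int) => if ¬ ((PySem.List.index? v a).getD 0 < (PySem.List.index? v b).getD 0) then y + 1 else y) acc.2 v)) := by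
    funext acc v
    dsimp only
    split_ifs <;> rfl
  rw [hstep,
    PySem.List.foldl_prod_mk
      (f := fun (x : Int) (v : List Int) => if (PySem.List.index? v a).getD 0 < (PySem.List.index? v b).getD 0 then x + 1 else x)
      (g := fun (y : Int) (v : List Int) => if ¬ ((PySem.List.index? v a).getD 0 < (PySem.List.index? v b).getD 0) then y + 1 else y),
    PySem.List.foldl_ite_add_one, PySem.List.foldl_ite_add_one]
  simp

-- one ballot's contribution to one counter cell
lemma pvBeatsStep_getD (candidates : List Int) (d : PySem.Dict (Int × Int) Int) (v : List Int) (k : Int × Int) :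
    (pvBeatsStep candidates d v).getD k 0
      = d.getD k 0 + (((PySem.List.pyRange 0 (PySem.List.len candidates) 1).map
          (fun c => (PySem.List.pyRange 0 (PySem.List.len candidates) 1).countP
            (fun c1 => decide (c ≠ c1 ∧ (pvRankDict v).getD (PySem.List.pyGetD candidates c 0) 0 < (pvRankDict v).getD (PySem.List.pyGetD candidates c1 0) 0)
              && ((c, c1) == k)))).sum : Int) :=
  pv_getD_foldl_inc2 _ _
    (K := fun c c1 => (c, c1))
    (P := fun c c1 => c ≠ c1 ∧ (pvRankDict v).getD (PySem.List.pyGetD candidates c 0) 0 < (pvRankDict v).getD (PySem.List.pyGetD candidates c1 0) 0) d k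

lemma pv_sum_ite_count (R : List Int) (z : Int) (t : Nat) :
    (R.map (fun c => if c = z then t else 0)).sum = R.count z * t := by
  induction R with
  | nil => simp
  | cons c R ih =>
    simp only [List.map_cons, List.sum_cons, ih, List.count_cons]
    by_cases h : c = z
    · subst h; simp [Nat.add_mul, Nat.add_comm]
    · simp [h]

-- that contribution is the indicator of "v ranks candidates[p] before candidates[q]"
lemma pv_sum_indicator (candidates : List Int)
    (v : List Int) (hv : ∀ c ∈ candidates, c ∈ v)
    (p q : Nat) (hp : p < candidates.length) (hq : q < candidates.length) (hpq : p ≠ q) :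
    ((PySem.List.pyRange 0 (PySem.List.len candidates) 1).map
        (fun c => (PySem.List.pyRange 0 (PySem.List.len candidates) 1).countP
          (fun c1 => decide (c ≠ c1 ∧ (pvRankDict v).getD (PySem.List.pyGetD candidates c 0) 0 < (pvRankDict v).getD (PySem.List.pyGetD candidates c1 0) 0)
            && ((c, c1) == ((p : Int), (q : Int)))))).sum
      = if (PySem.List.index? v candidates[p]).getD 0 < (PySem.List.index? v candidates[q]).getD 0 then 1 else 0 := by
  rw [PySem.List.len_eq]
  set n : Int := (candidates.length : Int) with hn
  have hrank : ((pvRankDict v).getD candidates[p] 0 < (pvRankDict v).getD candidates[q] 0)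
      ↔ (PySem.List.index? v candidates[p]).getD 0 < (PySem.List.index? v candidates[q]).getD 0 := by
    rw [pvRankDict_getD _ _ (hv _ (candidates.getElem_mem hp)),
        pvRankDict_getD _ _ (hv _ (candidates.getElem_mem hq))]
    exact_mod_cast Iff.rfl
  have hbound : ∀ (c : Int), 0 ≤ c → c < n → c.toNat < candidates.length := by
    intro c h0 h1; omega
  have hgp : ∀ (c : Int) (h0 : 0 ≤ c) (h1 : c < n),
      PySem.List.pyGetD candidates c 0 = candidates[c.toNat]'(hbound c h0 h1) :=
    fun c h0 h1 => PySem.List.pyGetD_eq_getElem candidates 0 h0 (by omega)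
  have hinner : ∀ c ∈ PySem.List.pyRange 0 n 1,
      (fun c => (PySem.List.pyRange 0 n 1).countP
          (fun c1 => decide (c ≠ c1 ∧ (pvRankDict v).getD (PySem.List.pyGetD candidates c 0) 0 < (pvRankDict v).getD (PySem.List.pyGetD candidates c1 0) 0)
            && ((c, c1) == ((p : Int), (q : Int))))) c
        = (fun c => if c = (p : Int) then (if (PySem.List.index? v candidates[p]).getD 0 < (PySem.List.index? v candidates[q]).getD 0 then 1 else 0) else 0) c := by
    intro c hc
    obtain ⟨hc0, hcn⟩ := PySem.List.mem_pyRange_one.mp hc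
    have hcg := hgp c hc0 hcn
    dsimp only
    have hpred : ∀ c1 ∈ PySem.List.pyRange 0 n 1,
        ((decide (c ≠ c1 ∧ (pvRankDict v).getD (PySem.List.pyGetD candidates c 0) 0 < (pvRankDict v).getD (PySem.List.pyGetD candidates c1 0) 0)
            && ((c, c1) == ((p : Int), (q : Int)))) = true)
          ↔ (c = (p : Int) ∧ c1 = (q : Int) ∧ (PySem.List.index? v candidates[p]).getD 0 < (PySem.List.index? v candidates[q]).getD 0) := by
      intro c1 hc1
      obtain ⟨h10, h1n⟩ := PySem.List.mem_pyRange_one.mp hc1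
      have h1g := hgp c1 h10 h1n
      rw [hcg, h1g]
      simp only [Bool.and_eq_true, decide_eq_true_eq, beq_iff_eq, Prod.mk.injEq]
      constructor
      · rintro ⟨⟨hne, hlt⟩, hep, heq⟩
        have hcp : c.toNat = p := by omega
        have h1q : c1.toNat = q := by omega
        refine ⟨hep, heq, ?_⟩
        simp only [hcp, h1q] at hlt
        exact hrank.mp hlt
      · rintro ⟨hce, h1e, hCC⟩
        have hcp : c.toNat = p := by omega
        have h1q : c1.toNat = q := by omega
        refine ⟨⟨by omega, ?_⟩, hce, h1e⟩
        simp only [hcp, h1q]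
        exact hrank.mpr hCC
    rw [List.countP_congr
      (q := fun c1 => decide (c = (p : Int) ∧ c1 = (q : Int) ∧ (PySem.List.index? v candidates[p]).getD 0 < (PySem.List.index? v candidates[q]).getD 0))
      (fun c1 h1 => by simp only [hpred c1 h1, decide_eq_true_eq])]
    by_cases hcp : c = (p : Int)
    · by_cases hCC : (PySem.List.index? v candidates[p]).getD 0 < (PySem.List.index? v candidates[q]).getD 0
      · simp only [hcp, hCC, and_true, true_and, if_true]
        have hcnt : (PySem.List.pyRange 0 n 1).countP (fun c1 => decide (c1 = (q : Int))) = (PySem.List.pyRange 0 n 1).count (q : Int) := by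
          refine List.countP_congr (fun x _ => ?_)
          simp
        rw [hcnt]
        exact List.count_eq_one_of_mem (PySem.List.nodup_pyRange_one 0 n)
          (PySem.List.mem_pyRange_one.mpr ⟨by omega, by omega⟩)
      · have h0 : (PySem.List.pyRange 0 n 1).countP
            (fun c1 => decide (c = (p : Int) ∧ c1 = (q : Int) ∧ (PySem.List.index? v candidates[p]).getD 0 < (PySem.List.index? v candidates[q]).getD 0)) = 0 :=
          List.countP_eq_zero.mpr (fun c1 _ => by simp only [decide_eq_true_eq]; rintro ⟨_, _, h3⟩; exact hCC h3)
        rw [h0, if_pos hcp, if_neg hCC]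
    · have h0 : (PySem.List.pyRange 0 n 1).countP
          (fun c1 => decide (c = (p : Int) ∧ c1 = (q : Int) ∧ (PySem.List.index? v candidates[p]).getD 0 < (PySem.List.index? v candidates[q]).getD 0)) = 0 :=
        List.countP_eq_zero.mpr (fun c1 _ => by simp only [decide_eq_true_eq]; rintro ⟨h1, _, _⟩; exact hcp h1)
      rw [h0, if_neg hcp]
  rw [List.map_congr_left hinner, pv_sum_ite_count,
    List.count_eq_one_of_mem (PySem.List.nodup_pyRange_one 0 n)
      (PySem.List.mem_pyRange_one.mpr ⟨by omega, by omega⟩)]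
  simp

-- the counter cell of an index pair counts the ballots ranking p before q
lemma pv_beats_getD (candidates : List Int)
    (p q : Nat) (hp : p < candidates.length) (hq : q < candidates.length) (hpq : p ≠ q) :
    ∀ (ballots : List (List Int)), (∀ v ∈ ballots, ∀ c ∈ candidates, c ∈ v) →
    ∀ (d : PySem.Dict (Int × Int) Int),
    (ballots.foldl (pvBeatsStep candidates) d).getD ((p : Int), (q : Int)) 0
      = d.getD ((p : Int), (q : Int)) 0
        + (ballots.countP (fun v => decide ((PySem.List.index? v candidates[p]).getD 0 < (PySem.List.index? v candidates[q]).getD 0)) : Int) := by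
  intro ballots
  induction ballots with
  | nil => intro _ d; simp
  | cons v ballots ih =>
    intro hv d
    rw [List.foldl_cons, ih (fun w hw => hv w (List.mem_cons_of_mem _ hw)),
      pvBeatsStep_getD, pv_sum_indicator candidates v (hv v (List.mem_cons_self ..)) p q hp hq hpq,
      List.countP_cons]
    by_cases hCC : (PySem.List.index? v candidates[p]).getD 0 < (PySem.List.index? v candidates[q]).getD 0
    · simp only [hCC, decide_true, if_pos]
      push_cast
      ring
    · simp only [hCC, decide_false, if_false]
      push_cast
      ring

-- A's inserted cell equals B's for each executed (c, c1) pair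
lemma pv_cell_eq (ballots : List (List Int)) (candidates : List Int)
    (hmem : 2 ≤ candidates.length → ∀ v ∈ ballots, ∀ c ∈ candidates, c ∈ v)
    (c c1 : Int) (hc : c ∈ PySem.List.pyRange 0 (PySem.List.len candidates - 1) 1)
    (hc1 : c1 ∈ PySem.List.pyRange 1 (PySem.List.len candidates) 1) (hne : c ≠ c1) :
    pvPairwise ballots (PySem.List.pyGetD candidates c 0) (PySem.List.pyGetD candidates c1 0)
      = ((ballots.foldl (pvBeatsStep candidates) PySem.Dict.empty).getD (c, c1) 0,
         PySem.List.len ballots - (ballots.foldl (pvBeatsStep candidates) PySem.Dict.empty).getD (c, c1) 0) := by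
  rw [PySem.List.len_eq] at hc hc1
  obtain ⟨hc0, hcn⟩ := PySem.List.mem_pyRange_one.mp hc
  obtain ⟨h10, h1n⟩ := PySem.List.mem_pyRange_one.mp hc1
  have hp : c.toNat < candidates.length := by omega
  have hq : c1.toNat < candidates.length := by omega
  have hpq : c.toNat ≠ c1.toNat := by omega
  have hlen2 : 2 ≤ candidates.length := by omega
  have hcg : PySem.List.pyGetD candidates c 0 = candidates[c.toNat] :=
    PySem.List.pyGetD_eq_getElem candidates 0 hc0 (by omega)
  have h1g : PySem.List.pyGetD candidates c1 0 = candidates[c1.toNat] :=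
    PySem.List.pyGetD_eq_getElem candidates 0 (by omega) (by omega)
  have hcast : ((c.toNat : Int), (c1.toNat : Int)) = (c, c1) := by
    simp only [Prod.mk.injEq]; omega
  rw [hcg, h1g, pvPairwise_eq, ← hcast,
    pv_beats_getD candidates c.toNat c1.toNat hp hq hpq ballots (hmem hlen2) PySem.Dict.empty]
  rw [PySem.Dict.getD_empty, PySem.List.len_eq]
  have hsplit : ballots.countP (fun v => decide (¬ (PySem.List.index? v candidates[c.toNat]).getD 0 < (PySem.List.index? v candidates[c1.toNat]).getD 0))
      = ballots.length - ballots.countP (fun v => decide ((PySem.List.index? v candidates[c.toNat]).getD 0 < (PySem.List.index? v candidates[c1.toNat]).getD 0)) := by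
    have h1 := List.length_eq_countP_add_countP (l := ballots)
      (fun v => decide ((PySem.List.index? v candidates[c.toNat]).getD 0 < (PySem.List.index? v candidates[c1.toNat]).getD 0))
    have h2 : ballots.countP (fun v => decide (¬ (PySem.List.index? v candidates[c.toNat]).getD 0 < (PySem.List.index? v candidates[c1.toNat]).getD 0))
        = ballots.countP (fun v => decide (¬ (decide ((PySem.List.index? v candidates[c.toNat]).getD 0 < (PySem.List.index? v candidates[c1.toNat]).getD 0) = true))) :=
      List.countP_congr (fun v _ => by simp)
    omega
  rw [hsplit]
  have hle := List.countP_le_length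
    (p := fun v => decide ((PySem.List.index? v candidates[c.toNat]).getD 0 < (PySem.List.index? v candidates[c1.toNat]).getD 0)) (l := ballots)
  simp only [zero_add, Prod.mk.injEq]
  refine ⟨trivial, by omega⟩

-- ===== VERDICT (by name: the statement is the Claim_ definition above) =====
theorem weighted_majority_graph_spec : Claim_equal_weighted_majority_graph := by
  intro ballots candidates _ hmem
  unfold Spec_weighted_majority_graph weighted_majority_graph weighted_majority_graph_alt
  have hfold :
      (PySem.List.pyRange 0 (PySem.List.len candidates - 1) 1).foldl
        (fun r c =>
          (PySem.List.pyRange 1 (PySem.List.len candidates) 1).foldl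
            (fun r c1 =>
              if c ≠ c1 then
                let ca := PySem.List.pyGetD candidates c 0
                let cb := PySem.List.pyGetD candidates c1 0
                let p := pvPairwise ballots ca cb
                let r := r.insert ca ((r.getD ca PySem.Dict.empty).insert cb p)
                r.insert cb ((r.getD cb PySem.Dict.empty).insert ca (p.2, p.1))
              else r)
            r)
        (PySem.Dict.empty : PySem.Dict Int (PySem.Dict Int (Int × Int)))
      = (PySem.List.pyRange 0 (PySem.List.len candidates - 1) 1).foldl
        (fun r c =>
          (PySem.List.pyRange 1 (PySem.List.len candidates) 1).foldl
            (fun r c1 =>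
              if c ≠ c1 then
                let a := PySem.List.pyGetD candidates c 0
                let b := PySem.List.pyGetD candidates c1 0
                let w := (ballots.foldl (pvBeatsStep candidates) PySem.Dict.empty).getD (c, c1) 0
                let r := r.insert a ((r.getD a PySem.Dict.empty).insert b (w, PySem.List.len ballots - w))
                r.insert b ((r.getD b PySem.Dict.empty).insert a (PySem.List.len ballots - w, w))
              else r)
            r)
        (PySem.Dict.empty : PySem.Dict Int (PySem.Dict Int (Int × Int))) := by
    apply PySem.List.foldl_congr_mem
    intro r c hc
    apply PySem.List.foldl_congr_mem
    intro r' c1 hc1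
    by_cases hne : c = c1
    · simp [hne]
    · dsimp only
      rw [if_pos hne, if_pos hne, pv_cell_eq ballots candidates hmem c c1 hc hc1 hne]
  exact congrArg (fun d : PySem.Dict Int (PySem.Dict Int (Int × Int)) =>
    List.map (fun q => (q.1, q.2.items)) d.items) hfold
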